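-- pv_equiv track=rewrite | github.com/heathermhuang/consensus-market | scripts/bbg-discover-fields.py | categorize_field
-- ===== SOURCE A (Python) =====
-- def categorize_field(field):
--     """Categorize a field for display."""
--     if field in ("BEST_SALES", "BEST_EPS", "BEST_EBITDA", "BEST_NET_INCOME",
--                  "BEST_OPER_INCOME", "BEST_GROSS_PROFIT", "BEST_FCF", "BEST_CAPEX",
--                  "BEST_DIV", "BEST_BPS", "BEST_CPS"):
--         return "Financial"
--     if field in ("BEST_GROSS_MARGIN", "BEST_OPER_MARGIN", "BEST_NET_MARGIN",
--                  "BEST_ROE", "BEST_ROA"):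
--         return "Margin/Ratio"
--     if "REVENUE" in field:
--         return "Revenue Segment"
--     if any(k in field for k in ("MAU", "DAU", "MTU", "MAPC", "ACTIVE", "SUBSCRIBER",
--                                  "PAYER", "BUYER", "RIDER", "USER", "CUSTOMER", "DAP")):
--         return "User/Engagement"
--     if any(k in field for k in ("ORDER", "TRIP", "RIDE", "TRANSACTION", "ROOM_NIGHT",
--                                  "NIGHT", "DELIVERY", "SHIPMENT", "PROCEDURE", "UNIT")):
--         return "Volume/Transaction"
--     if any(k in field for k in ("GMV", "GMS", "GOV", "GTV", "TPV", "GPV", "BOOKING")):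
--         return "GMV/Bookings"
--     if any(k in field for k in ("ARR", "MRR", "NRR", "RPO", "CRPO")):
--         return "SaaS/Recurring"
--     if any(k in field for k in ("ARPU", "ARM", "ARPAC")):
--         return "ARPU"
--     if any(k in field for k in ("STORE", "SSS", "COMP_SALES")):
--         return "Retail"
--     return "Other"
-- ===== SOURCE B (Python) =====
-- # Back-to-front rewrite: fold over the rules in REVERSE order with an overwriting
-- # accumulator (no early return); the earliest matching rule overwrites last, so it wins.
-- RULES = [
--     (True, ("BEST_SALES", "BEST_EPS", "BEST_EBITDA", "BEST_NET_INCOME",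
--             "BEST_OPER_INCOME", "BEST_GROSS_PROFIT", "BEST_FCF", "BEST_CAPEX",
--             "BEST_DIV", "BEST_BPS", "BEST_CPS"), "Financial"),
--     (True, ("BEST_GROSS_MARGIN", "BEST_OPER_MARGIN", "BEST_NET_MARGIN",
--             "BEST_ROE", "BEST_ROA"), "Margin/Ratio"),
--     (False, ("REVENUE",), "Revenue Segment"),
--     (False, ("MAU", "DAU", "MTU", "MAPC", "ACTIVE", "SUBSCRIBER",
--              "PAYER", "BUYER", "RIDER", "USER", "CUSTOMER", "DAP"), "User/Engagement"),
--     (False, ("ORDER", "TRIP", "RIDE", "TRANSACTION", "ROOM_NIGHT",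
--              "NIGHT", "DELIVERY", "SHIPMENT", "PROCEDURE", "UNIT"), "Volume/Transaction"),
--     (False, ("GMV", "GMS", "GOV", "GTV", "TPV", "GPV", "BOOKING"), "GMV/Bookings"),
--     (False, ("ARR", "MRR", "NRR", "RPO", "CRPO"), "SaaS/Recurring"),
--     (False, ("ARPU", "ARM", "ARPAC"), "ARPU"),
--     (False, ("STORE", "SSS", "COMP_SALES"), "Retail"),
-- ]
--
-- def categorize_field(field):
--     """Categorize a field for display."""
--     result = "Other"
--     for exact, keys, category in reversed(RULES):
--         if (field in keys) if exact else any(k in field for k in keys):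
--             result = category
--     return result
-- ===== Notes on version B (the rewrite author's own statement) =====
-- stated objective: alternative
-- what changed: Replaced the forward early-return if-chain with a back-to-front fold over the rules using an overwriting accumulator: every rule is evaluated, the last overwrite (= earliest matching rule) wins, and there is no early exit.
import Mathlib
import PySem

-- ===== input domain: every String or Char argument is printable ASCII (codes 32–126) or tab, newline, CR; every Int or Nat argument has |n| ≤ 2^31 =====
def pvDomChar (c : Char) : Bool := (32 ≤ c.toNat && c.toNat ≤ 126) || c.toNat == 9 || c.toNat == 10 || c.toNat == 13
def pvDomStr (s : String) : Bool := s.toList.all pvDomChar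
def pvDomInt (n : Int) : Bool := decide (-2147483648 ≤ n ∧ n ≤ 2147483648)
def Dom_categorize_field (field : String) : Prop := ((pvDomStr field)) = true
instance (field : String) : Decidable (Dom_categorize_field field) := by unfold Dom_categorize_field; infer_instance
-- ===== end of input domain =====

-- B replaces A's forward early-return if-chain by a back-to-front fold with an
-- overwriting accumulator (every rule evaluated; earliest match overwrites last, so it wins).

-- ===== PORT A =====
def categorize_field (field : String) : String :=
  if ["BEST_SALES", "BEST_EPS", "BEST_EBITDA", "BEST_NET_INCOME",
      "BEST_OPER_INCOME", "BEST_GROSS_PROFIT", "BEST_FCF", "BEST_CAPEX",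
      "BEST_DIV", "BEST_BPS", "BEST_CPS"].contains field then "Financial"
  else if ["BEST_GROSS_MARGIN", "BEST_OPER_MARGIN", "BEST_NET_MARGIN",
           "BEST_ROE", "BEST_ROA"].contains field then "Margin/Ratio"
  else if PySem.Str.isIn "REVENUE" field then "Revenue Segment"
  else if (["MAU", "DAU", "MTU", "MAPC", "ACTIVE", "SUBSCRIBER",
            "PAYER", "BUYER", "RIDER", "USER", "CUSTOMER", "DAP"].any
            (fun k => PySem.Str.isIn k field)) then "User/Engagement"
  else if (["ORDER", "TRIP", "RIDE", "TRANSACTION", "ROOM_NIGHT",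
            "NIGHT", "DELIVERY", "SHIPMENT", "PROCEDURE", "UNIT"].any
            (fun k => PySem.Str.isIn k field)) then "Volume/Transaction"
  else if (["GMV", "GMS", "GOV", "GTV", "TPV", "GPV", "BOOKING"].any
            (fun k => PySem.Str.isIn k field)) then "GMV/Bookings"
  else if (["ARR", "MRR", "NRR", "RPO", "CRPO"].any
            (fun k => PySem.Str.isIn k field)) then "SaaS/Recurring"
  else if (["ARPU", "ARM", "ARPAC"].any
            (fun k => PySem.Str.isIn k field)) then "ARPU"
  else if (["STORE", "SSS", "COMP_SALES"].any
            (fun k => PySem.Str.isIn k field)) then "Retail"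
  else "Other"

-- ===== PORT B =====
-- the rule table of Source B: (exact?, keys, category)
def pvRules : List (Bool × List String × String) :=
  [ (true, ["BEST_SALES", "BEST_EPS", "BEST_EBITDA", "BEST_NET_INCOME",
            "BEST_OPER_INCOME", "BEST_GROSS_PROFIT", "BEST_FCF", "BEST_CAPEX",
            "BEST_DIV", "BEST_BPS", "BEST_CPS"], "Financial"),
    (true, ["BEST_GROSS_MARGIN", "BEST_OPER_MARGIN", "BEST_NET_MARGIN",
            "BEST_ROE", "BEST_ROA"], "Margin/Ratio"),
    (false, ["REVENUE"], "Revenue Segment"),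
    (false, ["MAU", "DAU", "MTU", "MAPC", "ACTIVE", "SUBSCRIBER",
             "PAYER", "BUYER", "RIDER", "USER", "CUSTOMER", "DAP"], "User/Engagement"),
    (false, ["ORDER", "TRIP", "RIDE", "TRANSACTION", "ROOM_NIGHT",
             "NIGHT", "DELIVERY", "SHIPMENT", "PROCEDURE", "UNIT"], "Volume/Transaction"),
    (false, ["GMV", "GMS", "GOV", "GTV", "TPV", "GPV", "BOOKING"], "GMV/Bookings"),
    (false, ["ARR", "MRR", "NRR", "RPO", "CRPO"], "SaaS/Recurring"),
    (false, ["ARPU", "ARM", "ARPAC"], "ARPU"),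
    (false, ["STORE", "SSS", "COMP_SALES"], "Retail") ]

-- one step of Source B's loop: overwrite the accumulator if the rule matches
def pvStep (field : String) (result : String) (r : Bool × List String × String) : String :=
  if (if r.1 then r.2.1.contains field else r.2.1.any (fun k => PySem.Str.isIn k field))
  then r.2.2 else result

-- Source B: fold over reversed(RULES) with accumulator starting at "Other"
def categorize_field_alt (field : String) : String :=
  pvRules.reverse.foldl (pvStep field) "Other"

-- ===== PRECONDITION & SPEC =====
def Spec_categorize_field (field : String) (out : String) : Prop := out = categorize_field_alt field
instance (field : String) (out : String) : Decidable (Spec_categorize_field field out) := by unfold Spec_categorize_field; infer_instance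

-- ===== CLAIM (what is proved, stated in full; the proofs are below) =====
def Claim_equal_categorize_field : Prop := ∀ (field : String), Dom_categorize_field field → Spec_categorize_field field (categorize_field field)

-- ===== LEMMAS AND PROOFS =====

-- first-match-wins reading of a rule list (used only in the proof)
def pvFirst (field : String) : List (Bool × List String × String) → String
  | [] => "Other"
  | r :: rest =>
    if (if r.1 then r.2.1.contains field else r.2.1.any (fun k => PySem.Str.isIn k field))
    then r.2.2 else pvFirst field rest

-- the reverse fold with overwrite equals first-match-wins
theorem pvFold_eq_first (field : String) (l : List (Bool × List String × String)) :
    l.reverse.foldl (pvStep field) "Other" = pvFirst field l := by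
  induction l with
  | nil => rfl
  | cons r rest ih =>
    simp only [List.reverse_cons, List.foldl_append, List.foldl_cons, List.foldl_nil, ih]
    rfl

-- ===== VERDICT (by name: the statement is the Claim_ definition above) =====
theorem categorize_field_spec : Claim_equal_categorize_field := by
  intro field _
  unfold Spec_categorize_field categorize_field categorize_field_alt
  rw [pvFold_eq_first]
  simp only [pvRules, pvFirst, List.any_cons, List.any_nil, Bool.or_false, Bool.false_eq_true, if_true, if_false]
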